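-- pv_equiv track=rewrite | github.com/aelth/suricata-smb-print | suri.py | beautify_payload
-- ===== SOURCE A (Python) =====
-- def beautify_payload(payload):
--     res = ''
--     dot_count = 0
--     for i in range(0, len(payload)):
--         if payload[i] == '.':
--             dot_count += 1
--         else:
--             if dot_count > 1:
--                 res += '.'
--             res += payload[i]
--             dot_count = 0
--
--     res = res.replace('\r', '\\r').replace('\n', '\\n')
--     return res
-- ===== SOURCE B (Python) =====
-- def beautify_payload(payload):
--     # Run-length encode the payload, drop a trailing dot run, then render
--     # each run: a dot run of length > 1 becomes '.', of length 1 becomes '',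
--     # any other run is kept verbatim.
--     runs = []
--     for ch in payload:
--         if runs and runs[-1][0] == ch:
--             runs[-1][1] += 1
--         else:
--             runs.append([ch, 1])
--     if runs and runs[-1][0] == '.':
--         runs.pop()
--     res = ''.join('.' if ch == '.' and n > 1 else '' if ch == '.' else ch * n
--                   for ch, n in runs)
--     return res.replace('\r', '\\r').replace('\n', '\\n')
-- ===== Notes on version B (the rewrite author's own statement) =====
-- stated objective: alternative
-- what changed: Replaces A's single char-by-char scan with a dot counter by a pipeline: run-length encode the payload, pop a trailing dot run, then render each run ('.' for dot runs longer than 1, nothing for single dots, the run verbatim otherwise) and join.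
import Mathlib
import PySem

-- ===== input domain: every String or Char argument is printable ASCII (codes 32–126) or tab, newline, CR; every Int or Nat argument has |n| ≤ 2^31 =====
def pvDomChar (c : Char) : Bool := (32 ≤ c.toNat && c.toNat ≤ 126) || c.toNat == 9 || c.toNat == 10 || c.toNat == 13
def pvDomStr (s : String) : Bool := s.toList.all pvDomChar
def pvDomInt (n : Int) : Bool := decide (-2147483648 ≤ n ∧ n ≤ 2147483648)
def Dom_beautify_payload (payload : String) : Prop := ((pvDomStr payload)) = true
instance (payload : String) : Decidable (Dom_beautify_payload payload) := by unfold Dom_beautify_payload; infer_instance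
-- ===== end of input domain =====

-- B replaces A's char-by-char scan with counter state by a run-length
-- encode / drop-trailing-dot-run / render-each-run pipeline (objective: alternative decomposition).

-- ===== PORT A =====
-- one step of A's for-loop: state = (res as chars, dot_count)
def pvAStep (st : List Char × Nat) (c : Char) : List Char × Nat :=
  if c = '.' then (st.1, st.2 + 1)
  else (st.1 ++ (if st.2 > 1 then ['.'] else []) ++ [c], 0)

def beautify_payload (payload : String) : String :=
  let st := payload.toList.foldl pvAStep ([], 0)
  PySem.Str.replace (PySem.Str.replace (String.ofList st.1) "\r" "\\r") "\n" "\\n"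

-- ===== PORT B =====
-- one step of B's run-length-encoding loop (runs[-1][1] += 1 / runs.append)
def pvRleStep (runs : List (Char × Nat)) (c : Char) : List (Char × Nat) :=
  match runs.getLast? with
  | some (d, n) => if d = c then runs.dropLast ++ [(d, n + 1)] else runs ++ [(c, 1)]
  | none => [(c, 1)]

-- B's comprehension body: how one run is rendered
def pvEmitRun (r : Char × Nat) : List Char :=
  if r.1 = '.' ∧ r.2 > 1 then ['.'] else if r.1 = '.' then [] else List.replicate r.2 r.1

def beautify_payload_alt (payload : String) : String :=
  let runs := payload.toList.foldl pvRleStep []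
  let runs := if (runs.getLast?.map Prod.fst) = some '.' then runs.dropLast else runs
  let res := String.ofList (runs.flatMap pvEmitRun)
  PySem.Str.replace (PySem.Str.replace res "\r" "\\r") "\n" "\\n"

-- ===== PRECONDITION & SPEC =====
def Spec_beautify_payload (payload : String) (out : String) : Prop := out = beautify_payload_alt payload
instance (payload : String) (out : String) : Decidable (Spec_beautify_payload payload out) := by unfold Spec_beautify_payload; infer_instance

-- ===== CLAIM (what is proved, stated in full; the proofs are below) =====
def Claim_equal_beautify_payload : Prop := ∀ (payload : String), Dom_beautify_payload payload → Spec_beautify_payload payload (beautify_payload payload)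

-- ===== LEMMAS AND PROOFS =====

-- length of the trailing dot run of an RLE list (0 if none)
def pvDotTailLen (runs : List (Char × Nat)) : Nat :=
  match runs.getLast? with
  | some (d, n) => if d = '.' then n else 0
  | none => 0

-- drop the trailing run iff it is a dot run (B's pop step)
def pvDropDotTail (runs : List (Char × Nat)) : List (Char × Nat) :=
  if (runs.getLast?.map Prod.fst) = some '.' then runs.dropLast else runs

-- one step preserves the simulation invariant
lemma pvStep_pres (runs : List (Char × Nat)) (c : Char) :
    ((if c = '.' then ((pvDropDotTail runs).flatMap pvEmitRun, pvDotTailLen runs + 1)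
      else ((pvDropDotTail runs).flatMap pvEmitRun ++ (if pvDotTailLen runs > 1 then ['.'] else []) ++ [c], 0))
      : List Char × Nat)
    = ((pvDropDotTail (pvRleStep runs c)).flatMap pvEmitRun, pvDotTailLen (pvRleStep runs c)) := by
  rcases List.eq_nil_or_concat runs with h | ⟨ys, ⟨d, n⟩, h⟩
  · subst h
    by_cases hc : c = '.' <;>
      simp [pvRleStep, pvDropDotTail, pvDotTailLen, pvEmitRun, hc]
  · subst h
    by_cases hdc : d = c
    · subst hdc
      by_cases hc : d = '.'
      · subst hc
        simp [pvRleStep, pvDropDotTail, pvDotTailLen]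
      · simp [pvRleStep, pvDropDotTail, pvDotTailLen, pvEmitRun, hc,
              List.replicate_succ' (n := n)]
    · by_cases hc : c = '.'
      · subst hc
        by_cases hd : d = '.'
        · exact absurd hd hdc
        · simp [pvRleStep, pvDropDotTail, pvDotTailLen, pvEmitRun, hdc]
      · by_cases hd : d = '.'
        · subst hd
          simp [pvRleStep, pvDropDotTail, pvDotTailLen, pvEmitRun, hdc, hc]
        · simp [pvRleStep, pvDropDotTail, pvDotTailLen, pvEmitRun, hdc, hc, hd]

lemma pvFold_sim : ∀ (cs : List Char) (runs : List (Char × Nat)),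
    cs.foldl pvAStep ((pvDropDotTail runs).flatMap pvEmitRun, pvDotTailLen runs)
      = ((pvDropDotTail (cs.foldl pvRleStep runs)).flatMap pvEmitRun,
         pvDotTailLen (cs.foldl pvRleStep runs)) := by
  intro cs
  induction cs with
  | nil => intro runs; simp
  | cons c cs ih =>
    intro runs
    have hstep := pvStep_pres runs c
    have : pvAStep ((pvDropDotTail runs).flatMap pvEmitRun, pvDotTailLen runs) c
        = ((pvDropDotTail (pvRleStep runs c)).flatMap pvEmitRun,
           pvDotTailLen (pvRleStep runs c)) := by
      by_cases hc : c = '.' <;> simpa [pvAStep, hc] using hstep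
    simp [List.foldl_cons, this, ih]

-- ===== VERDICT (by name: the statement is the Claim_ definition above) =====
theorem beautify_payload_spec : Claim_equal_beautify_payload := by
  intro payload _
  unfold Spec_beautify_payload beautify_payload beautify_payload_alt
  have h1 : (payload.toList.foldl pvAStep ([], 0)).1
      = (pvDropDotTail (payload.toList.foldl pvRleStep [])).flatMap pvEmitRun := by
    rw [show ((([] : List Char), (0 : Nat)))
          = ((pvDropDotTail []).flatMap pvEmitRun, pvDotTailLen []) from rfl,
        pvFold_sim payload.toList []]
  simp only [h1, pvDropDotTail]
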